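-- pv_equiv track=rewrite | github.com/skchaudr/MyAPI | context_refinery/triage/passes/projects.py | normalize_projects
-- ===== SOURCE A (Python) =====
-- PRESET_PROJECTS = [
--     "context-refinery", "bdr-project", "water-and-stone",
--     "socialxp", "smb-ops-hub", "cim",
-- ]
--
-- def normalize_projects(projects):
--     """Keep preset projects in a stable order, then preserve custom projects."""
--     seen = set()
--     normalized = []
--
--     for proj in PRESET_PROJECTS:
--         if proj in projects and proj not in seen:
--             normalized.append(proj)
--             seen.add(proj)
--
--     for proj in projects:
--         if proj not in seen:
--             normalized.append(proj)
--             seen.add(proj)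
--
--     return normalized
-- ===== SOURCE B (Python) =====
-- PRESET_PROJECTS = [
--     "context-refinery", "bdr-project", "water-and-stone",
--     "socialxp", "smb-ops-hub", "cim",
-- ]
--
-- def normalize_projects(projects):
--     """Single pass over projects with a rank table; presets are collected as
--     rank indices and emitted in rank order, customs keep first-occurrence order."""
--     rank = {p: i for i, p in enumerate(PRESET_PROJECTS)}
--     seen = set()
--     found = set()
--     custom = []
--     for p in projects:
--         if p in seen:
--             continue
--         seen.add(p)
--         i = rank.get(p)
--         if i is not None:
--             found.add(i)
--         else:
--             custom.append(p)
--     return [PRESET_PROJECTS[i] for i in sorted(found)] + custom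
-- ===== Notes on version B (the rewrite author's own statement) =====
-- stated objective: alternative
-- what changed: Replaces A's two sequential scans (a pass over PRESET_PROJECTS with an O(n) list-membership test for each preset, then a dedup pass) by one single pass over the input with a prebuilt rank dictionary, collecting preset ranks into a set that is sorted at the end while customs keep first-occurrence order.
import Mathlib
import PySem

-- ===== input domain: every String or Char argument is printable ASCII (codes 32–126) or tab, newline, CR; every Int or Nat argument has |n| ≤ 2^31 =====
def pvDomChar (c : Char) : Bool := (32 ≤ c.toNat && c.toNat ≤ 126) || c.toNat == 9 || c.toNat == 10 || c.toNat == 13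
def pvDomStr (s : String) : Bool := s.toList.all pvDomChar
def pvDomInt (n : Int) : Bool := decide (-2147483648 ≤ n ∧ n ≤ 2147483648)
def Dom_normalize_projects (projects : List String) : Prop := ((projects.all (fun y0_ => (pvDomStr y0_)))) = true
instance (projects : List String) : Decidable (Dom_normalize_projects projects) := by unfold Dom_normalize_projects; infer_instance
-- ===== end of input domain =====

set_option maxRecDepth 4000


-- B replaces A's two sequential scans by one pass with a rank dictionary plus a final
-- sort of the collected preset ranks (objective: alternative; same results).

def PRESET_PROJECTS : List String :=
  ["context-refinery", "bdr-project", "water-and-stone", "socialxp", "smb-ops-hub", "cim"]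

-- ===== PORT A =====
-- first loop body: for proj in PRESET_PROJECTS: if proj in projects and proj not in seen: …
def pvStepA1 (projects : List String) (st : PySem.Set String × List String) (proj : String) :
    PySem.Set String × List String :=
  if proj ∈ projects ∧ proj ∉ st.1 then (PySem.Set.add st.1 proj, st.2 ++ [proj]) else st

-- second loop body: for proj in projects: if proj not in seen: …
def pvStepA2 (st : PySem.Set String × List String) (proj : String) :
    PySem.Set String × List String :=
  if proj ∉ st.1 then (PySem.Set.add st.1 proj, st.2 ++ [proj]) else st

def normalize_projects (projects : List String) : List String :=
  (projects.foldl pvStepA2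
    (PRESET_PROJECTS.foldl (pvStepA1 projects) (PySem.Set.empty, []))).2

-- ===== PORT B =====
-- rank = {p: i for i, p in enumerate(PRESET_PROJECTS)}
def pvRank : PySem.Dict String Int :=
  (PySem.List.enumerate PRESET_PROJECTS).foldl (fun d ip => d.insert ip.2 ip.1) PySem.Dict.empty

-- loop body of B: skip if seen; else classify via rank.get(p)
def pvStepB (st : PySem.Set String × PySem.Set Int × List String) (p : String) :
    PySem.Set String × PySem.Set Int × List String :=
  if p ∈ st.1 then st
  else
    match pvRank.get? p with
    | some i => (PySem.Set.add st.1 p, PySem.Set.add st.2.1 i, st.2.2)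
    | none   => (PySem.Set.add st.1 p, st.2.1, st.2.2 ++ [p])

def normalize_projects_alt (projects : List String) : List String :=
  let st := projects.foldl pvStepB (PySem.Set.empty, PySem.Set.empty, [])
  -- [PRESET_PROJECTS[i] for i in sorted(found)]: every i in found is a rank 0..5,
  -- so PRESET_PROJECTS[i] never raises; pyGet? is exact there and the default is dead code.
  (PySem.List.sorted st.2.1 (fun i => i) false).map
    (fun i => (PySem.List.pyGet? PRESET_PROJECTS i).getD "") ++ st.2.2

-- ===== PRECONDITION & SPEC =====
def Spec_normalize_projects (projects : List String) (out : List String) : Prop := out = normalize_projects_alt projects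
instance (projects : List String) (out : List String) : Decidable (Spec_normalize_projects projects out) := by unfold Spec_normalize_projects; infer_instance

-- ===== CLAIM (what is proved, stated in full; the proofs are below) =====
def Claim_equal_normalize_projects : Prop := ∀ (projects : List String), Dom_normalize_projects projects → Spec_normalize_projects projects (normalize_projects projects)

-- ===== LEMMAS AND PROOFS =====

-- rank lookup characterised on all strings
theorem pvRank_get (p : String) (i : Int) :
    pvRank.get? p = some i ↔
      (p = "context-refinery" ∧ i = 0) ∨ (p = "bdr-project" ∧ i = 1) ∨
      (p = "water-and-stone" ∧ i = 2) ∨ (p = "socialxp" ∧ i = 3) ∨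
      (p = "smb-ops-hub" ∧ i = 4) ∨ (p = "cim" ∧ i = 5) := by
  have h : pvRank = PySem.Dict.mk [("context-refinery", 0), ("bdr-project", 1),
      ("water-and-stone", 2), ("socialxp", 3), ("smb-ops-hub", 4), ("cim", 5)] := by decide
  rw [h]
  simp only [PySem.Dict.get?_mk_cons]
  split_ifs with h0 h1 h2 h3 h4 h5
  · rw [beq_iff_eq] at h0; subst h0; simp; exact eq_comm
  · rw [beq_iff_eq] at h1; subst h1; simp; exact eq_comm
  · rw [beq_iff_eq] at h2; subst h2; simp; exact eq_comm
  · rw [beq_iff_eq] at h3; subst h3; simp; exact eq_comm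
  · rw [beq_iff_eq] at h4; subst h4; simp; exact eq_comm
  · rw [beq_iff_eq] at h5; subst h5; simp; exact eq_comm
  · simp only [beq_iff_eq] at h0 h1 h2 h3 h4 h5
    simp [PySem.Dict.get?, Ne.symm h0, Ne.symm h1, Ne.symm h2, Ne.symm h3, Ne.symm h4, Ne.symm h5]

-- A's first loop over a nodup list of fresh elements appends exactly the members of `projects`
theorem pvLoop1 (projects : List String) :
    ∀ (l : List String) (seen : PySem.Set String) (acc : List String),
      l.Nodup → (∀ p ∈ l, p ∉ seen) →
      (l.foldl (pvStepA1 projects) (seen, acc)).2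
          = acc ++ l.filter (fun p => decide (p ∈ projects)) ∧
      (∀ x, x ∈ (l.foldl (pvStepA1 projects) (seen, acc)).1
          ↔ x ∈ seen ∨ (x ∈ l ∧ x ∈ projects)) := by
  intro l
  induction l with
  | nil => intro seen acc _ _; simp
  | cons p rest ih =>
    intro seen acc hnd hfresh
    have hp : p ∉ seen := hfresh p (by simp)
    rw [List.foldl_cons]
    by_cases hmem : p ∈ projects
    · have hstep : pvStepA1 projects (seen, acc) p
          = (PySem.Set.add seen p, acc ++ [p]) := by
        simp [pvStepA1, hmem, hp]
      rw [hstep]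
      have hfresh' : ∀ q ∈ rest, q ∉ PySem.Set.add seen p := by
        intro q hq
        have hqp : q ≠ p := by
          intro h; subst h; exact (List.nodup_cons.mp hnd).1 hq
        simp [PySem.Set.mem_add, hqp, hfresh q (by simp [hq])]
      obtain ⟨h1, h2⟩ := ih (PySem.Set.add seen p) (acc ++ [p])
        (List.nodup_cons.mp hnd).2 hfresh'
      refine ⟨?_, ?_⟩
      · simp [h1, hmem]
      · intro x
        rw [h2 x]
        simp only [PySem.Set.mem_add, List.mem_cons]
        constructor
        · rintro (⟨h | h⟩ | ⟨h, h'⟩)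
          · exact Or.inl h
          · exact Or.inr ⟨Or.inl h, h ▸ hmem⟩
          · exact Or.inr ⟨Or.inr h, h'⟩
        · rintro (h | ⟨h | h, h'⟩)
          · exact Or.inl (Or.inl h)
          · exact Or.inl (Or.inr h)
          · exact Or.inr ⟨h, h'⟩
    · have hstep : pvStepA1 projects (seen, acc) p = (seen, acc) := by
        simp [pvStepA1, hmem]
      rw [hstep]
      obtain ⟨h1, h2⟩ := ih seen acc (List.nodup_cons.mp hnd).2
        (fun q hq => hfresh q (by simp [hq]))
      refine ⟨by simp [h1, hmem], ?_⟩
      intro x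
      rw [h2 x]
      constructor
      · rintro (h | ⟨h, h'⟩)
        · exact Or.inl h
        · exact Or.inr ⟨by simp [h], h'⟩
      · rintro (h | ⟨h, h'⟩)
        · exact Or.inl h
        · rcases List.mem_cons.mp h with h | h
          · subst h; exact absurd h' hmem
          · exact Or.inr ⟨h, h'⟩

-- A's second loop and B's loop append the same suffix, given the joint invariant
theorem pvLoop2 :
    ∀ (l : List String) (seenA seenB : PySem.Set String) (found : PySem.Set Int)
      (accA custom : List String),
      (∀ p ∈ l, (∃ i, pvRank.get? p = some i) → p ∈ seenA) →
      (∀ p, pvRank.get? p = none → (p ∈ seenA ↔ p ∈ seenB)) →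
      ∃ t, (l.foldl pvStepA2 (seenA, accA)).2 = accA ++ t ∧
           (l.foldl pvStepB (seenB, found, custom)).2.2 = custom ++ t := by
  intro l
  induction l with
  | nil => intro seenA seenB found accA custom _ _; exact ⟨[], by simp, by simp⟩
  | cons p rest ih =>
    intro seenA seenB found accA custom hpre hiff
    rw [List.foldl_cons, List.foldl_cons]
    rcases hr : pvRank.get? p with _ | i
    · -- custom element
      by_cases hA : p ∈ seenA
      · have hB : p ∈ seenB := (hiff p hr).mp hA
        have hsA : pvStepA2 (seenA, accA) p = (seenA, accA) := by simp [pvStepA2, hA]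
        have hsB : pvStepB (seenB, found, custom) p = (seenB, found, custom) := by
          simp [pvStepB, hB]
        rw [hsA, hsB]
        exact ih seenA seenB found accA custom
          (fun q hq => hpre q (by simp [hq])) hiff
      · have hB : p ∉ seenB := fun h => hA ((hiff p hr).mpr h)
        have hsA : pvStepA2 (seenA, accA) p
            = (PySem.Set.add seenA p, accA ++ [p]) := by simp [pvStepA2, hA]
        have hsB : pvStepB (seenB, found, custom) p
            = (PySem.Set.add seenB p, found, custom ++ [p]) := by
          simp [pvStepB, hB, hr]
        rw [hsA, hsB]
        obtain ⟨t, ht1, ht2⟩ := ih (PySem.Set.add seenA p) (PySem.Set.add seenB p) found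
          (accA ++ [p]) (custom ++ [p])
          (fun q hq hrq => by
            simp [PySem.Set.mem_add]
            exact Or.inl (hpre q (by simp [hq]) hrq))
          (fun q hrq => by
            simp only [PySem.Set.mem_add]
            rw [hiff q hrq])
        exact ⟨p :: t, by simp [ht1], by simp [ht2]⟩
    · -- preset element: A already has it in seen
      have hA : p ∈ seenA := hpre p (by simp) ⟨i, hr⟩
      have hsA : pvStepA2 (seenA, accA) p = (seenA, accA) := by simp [pvStepA2, hA]
      rw [hsA]
      by_cases hB : p ∈ seenB
      · have hsB : pvStepB (seenB, found, custom) p = (seenB, found, custom) := by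
          simp [pvStepB, hB]
        rw [hsB]
        exact ih seenA seenB found accA custom
          (fun q hq => hpre q (by simp [hq])) hiff
      · have hsB : pvStepB (seenB, found, custom) p
            = (PySem.Set.add seenB p, PySem.Set.add found i, custom) := by
          simp [pvStepB, hB, hr]
        rw [hsB]
        exact ih seenA (PySem.Set.add seenB p) (PySem.Set.add found i) accA custom
          (fun q hq => hpre q (by simp [hq]))
          (fun q hrq => by
            simp only [PySem.Set.mem_add]
            rw [hiff q hrq]
            have : q ≠ p := fun h => by rw [h, hr] at hrq; cases hrq
            simp [this])

-- B's loop: seen collects the traversed elements; found tracks exactly the seen presets,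
-- stays inside the rank range, and stays nodup
theorem pvLoopB :
    ∀ (l : List String) (seen : PySem.Set String) (found : PySem.Set Int)
      (custom : List String),
      (∀ p i, pvRank.get? p = some i → (p ∈ seen ↔ i ∈ found)) →
      (∀ j, j ∈ found → ∃ q, pvRank.get? q = some j) →
      found.Nodup →
      (∀ x, x ∈ (l.foldl pvStepB (seen, found, custom)).1 ↔ x ∈ seen ∨ x ∈ l) ∧
      (∀ p i, pvRank.get? p = some i →
        (p ∈ (l.foldl pvStepB (seen, found, custom)).1
          ↔ i ∈ (l.foldl pvStepB (seen, found, custom)).2.1)) ∧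
      (∀ j, j ∈ (l.foldl pvStepB (seen, found, custom)).2.1 →
        ∃ q, pvRank.get? q = some j) ∧
      (l.foldl pvStepB (seen, found, custom)).2.1.Nodup := by
  intro l
  induction l with
  | nil =>
    intro seen found custom h1 h2 h3
    exact ⟨fun x => by simp, h1, h2, h3⟩
  | cons p rest ih =>
    intro seen found custom h1 h2 h3
    rw [List.foldl_cons]
    by_cases hp : p ∈ seen
    · have hs : pvStepB (seen, found, custom) p = (seen, found, custom) := by
        simp [pvStepB, hp]
      rw [hs]
      obtain ⟨g1, g2, g3, g4⟩ := ih seen found custom h1 h2 h3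
      refine ⟨fun x => ?_, g2, g3, g4⟩
      rw [g1 x]
      simp only [List.mem_cons]
      constructor
      · rintro (h | h)
        · exact Or.inl h
        · exact Or.inr (Or.inr h)
      · rintro (h | h | h)
        · exact Or.inl h
        · exact Or.inl (h ▸ hp)
        · exact Or.inr h
    · rcases hr : pvRank.get? p with _ | i
      · have hs : pvStepB (seen, found, custom) p
            = (PySem.Set.add seen p, found, custom ++ [p]) := by simp [pvStepB, hp, hr]
        rw [hs]
        obtain ⟨g1, g2, g3, g4⟩ := ih (PySem.Set.add seen p) found (custom ++ [p])
          (fun q j hq => by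
            have hqp : q ≠ p := fun h => by rw [h, hr] at hq; cases hq
            rw [← h1 q j hq]; simp [PySem.Set.mem_add, hqp])
          h2 h3
        refine ⟨fun x => ?_, g2, g3, g4⟩
        rw [g1 x]
        simp [PySem.Set.mem_add]
        tauto
      · have hs : pvStepB (seen, found, custom) p
            = (PySem.Set.add seen p, PySem.Set.add found i, custom) := by
          simp [pvStepB, hp, hr]
        rw [hs]
        have hif : i ∉ found := fun hi => hp ((h1 p i hr).mpr hi)
        obtain ⟨g1, g2, g3, g4⟩ := ih (PySem.Set.add seen p) (PySem.Set.add found i) custom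
          (fun q j hq => by
            simp only [PySem.Set.mem_add]
            by_cases hqp : q = p
            · subst hqp
              have : j = i := by rw [hq] at hr; cases hr; rfl
              subst this
              simp
            · have hji : j ≠ i := by
                intro h; subst h
                -- injectivity of rank from the characterisation
                rcases (pvRank_get q j).mp hq with ⟨hq', hj⟩ | ⟨hq', hj⟩ | ⟨hq', hj⟩ |
                  ⟨hq', hj⟩ | ⟨hq', hj⟩ | ⟨hq', hj⟩ <;>
                rcases (pvRank_get p j).mp (hj ▸ hr) with ⟨hp', _⟩ | ⟨hp', _⟩ | ⟨hp', _⟩ |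
                  ⟨hp', _⟩ | ⟨hp', _⟩ | ⟨hp', _⟩ <;>
                simp_all
              rw [← h1 q j hq]
              simp [hqp, hji])
          (fun j hj => by
            rcases (PySem.Set.mem_add _ _ _).mp hj with h | h
            · exact h2 j h
            · exact ⟨p, h ▸ hr⟩)
          (PySem.Set.nodup_add _ _ h3)
        refine ⟨fun x => ?_, g2, g3, g4⟩
        rw [g1 x]
        simp [PySem.Set.mem_add]
        tauto
      
theorem normalize_projects_spec_aux (projects : List String) :
    normalize_projects projects = normalize_projects_alt projects := by
  -- characterise A's first loop
  obtain ⟨hA1, hA1seen⟩ := pvLoop1 projects PRESET_PROJECTS PySem.Set.empty []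
    (by decide) (by intro p _ h; cases h)
  -- characterise B's loop
  obtain ⟨hBseen, hBiff, hBrange, hBnodup⟩ :=
    pvLoopB projects PySem.Set.empty PySem.Set.empty []
      (fun p i h => by constructor <;> (intro hh; cases hh))
      (fun j h => by cases h) (by constructor)
  set stB := projects.foldl pvStepB (PySem.Set.empty, PySem.Set.empty, []) with hstB
  set seenA := (PRESET_PROJECTS.foldl (pvStepA1 projects) (PySem.Set.empty, [])).1 with hseenA
  set flt := PRESET_PROJECTS.filter (fun p => decide (p ∈ projects)) with hflt
  -- joint second-loop lemma, from A's post-loop-1 state and B's initial state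
  obtain ⟨t, ht1, ht2⟩ := pvLoop2 projects seenA PySem.Set.empty PySem.Set.empty flt []
    (fun p hpl hi => by
      rcases hi with ⟨i, hi⟩
      rw [hA1seen p]
      refine Or.inr ⟨?_, hpl⟩
      rcases (pvRank_get p i).mp hi with ⟨h, _⟩ | ⟨h, _⟩ | ⟨h, _⟩ | ⟨h, _⟩ | ⟨h, _⟩ | ⟨h, _⟩ <;>
        subst h <;> decide)
    (fun p hr => by
      rw [hA1seen p]
      constructor
      · rintro (h | ⟨h, _⟩)
        · exact h
        · exfalso
          simp only [PRESET_PROJECTS, List.mem_cons, List.not_mem_nil, or_false] at h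
          rcases h with h | h | h | h | h | h <;> subst h <;> exact absurd hr (by decide)
      · intro h; cases h)
  -- membership of B's found-set, rank by rank
  have hseenB : ∀ x, x ∈ stB.1 ↔ x ∈ projects := by
    intro x; rw [hBseen x]; simp [PySem.Set.empty]
  have hF : ∀ (p : String) (i : Int), pvRank.get? p = some i →
      ((i ∈ stB.2.1) ↔ p ∈ projects) := by
    intro p i h
    rw [← hBiff p i h, hseenB p]
  have hFrange : ∀ i, i ∈ stB.2.1 → i = 0 ∨ i = 1 ∨ i = 2 ∨ i = 3 ∨ i = 4 ∨ i = 5 := by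
    intro i hi
    rcases hBrange i hi with ⟨q, hq⟩
    rcases (pvRank_get q i).mp hq with ⟨_, h⟩ | ⟨_, h⟩ | ⟨_, h⟩ | ⟨_, h⟩ | ⟨_, h⟩ | ⟨_, h⟩ <;>
      simp [h]
  -- the sorted found-set is the increasing list of present ranks
  set ys := ([0, 1, 2, 3, 4, 5] : List Int).filter (fun i => decide (i ∈ stB.2.1)) with hys
  have hperm : ys.Perm stB.2.1 := by
    rw [List.perm_ext_iff_of_nodup (List.Nodup.filter _ (by decide)) hBnodup]
    intro a
    simp only [List.mem_filter, decide_eq_true_eq]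
    constructor
    · rintro ⟨_, h⟩; exact h
    · intro h
      refine ⟨?_, h⟩
      rcases hFrange a h with h' | h' | h' | h' | h' | h' <;> simp [h']
  have hpair : ys.Pairwise (· < ·) :=
    List.Pairwise.filter _ (by decide : ([0, 1, 2, 3, 4, 5] : List Int).Pairwise (· < ·))
  have hsort : PySem.List.sorted stB.2.1 (fun i => i) false = ys :=
    PySem.List.sorted_eq_of_perm_of_pairwise_lt stB.2.1 ys (fun i => i) hperm hpair
  -- the mapped ranks are exactly A's preset filter
  have c0 : decide ((0 : Int) ∈ stB.2.1) = decide ("context-refinery" ∈ projects) :=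
    decide_eq_decide.mpr (hF "context-refinery" 0 (by decide))
  have c1 : decide ((1 : Int) ∈ stB.2.1) = decide ("bdr-project" ∈ projects) :=
    decide_eq_decide.mpr (hF "bdr-project" 1 (by decide))
  have c2 : decide ((2 : Int) ∈ stB.2.1) = decide ("water-and-stone" ∈ projects) :=
    decide_eq_decide.mpr (hF "water-and-stone" 2 (by decide))
  have c3 : decide ((3 : Int) ∈ stB.2.1) = decide ("socialxp" ∈ projects) :=
    decide_eq_decide.mpr (hF "socialxp" 3 (by decide))
  have c4 : decide ((4 : Int) ∈ stB.2.1) = decide ("smb-ops-hub" ∈ projects) :=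
    decide_eq_decide.mpr (hF "smb-ops-hub" 4 (by decide))
  have c5 : decide ((5 : Int) ∈ stB.2.1) = decide ("cim" ∈ projects) :=
    decide_eq_decide.mpr (hF "cim" 5 (by decide))
  have hmap : ys.map (fun i => (PySem.List.pyGet? PRESET_PROJECTS i).getD "") = flt := by
    rw [hys, hflt]
    simp only [List.filter_cons, List.filter_nil, PRESET_PROJECTS]
    rw [c0, c1, c2, c3, c4, c5]
    by_cases b0 : "context-refinery" ∈ projects <;>
      by_cases b1 : "bdr-project" ∈ projects <;>
      by_cases b2 : "water-and-stone" ∈ projects <;>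
      by_cases b3 : "socialxp" ∈ projects <;>
      by_cases b4 : "smb-ops-hub" ∈ projects <;>
      by_cases b5 : "cim" ∈ projects <;>
      simp [b0, b1, b2, b3, b4, b5]
  -- assemble
  have hpairA : PRESET_PROJECTS.foldl (pvStepA1 projects) (PySem.Set.empty, []) = (seenA, flt) := by
    rw [hseenA, hflt]
    exact Prod.ext rfl hA1
  have hBside : normalize_projects_alt projects =
      (PySem.List.sorted stB.2.1 (fun i => i) false).map
        (fun i => (PySem.List.pyGet? PRESET_PROJECTS i).getD "") ++ stB.2.2 := rfl
  show (projects.foldl pvStepA2 (PRESET_PROJECTS.foldl (pvStepA1 projects) (PySem.Set.empty, []))).2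
      = _
  rw [hpairA, ht1, hBside, hsort, hmap, hstB, ht2]
  simp

-- ===== VERDICT (by name: the statement is the Claim_ definition above) =====
theorem normalize_projects_spec : Claim_equal_normalize_projects := by
  intro projects _
  unfold Spec_normalize_projects
  exact normalize_projects_spec_aux projects
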